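-- pv_equiv track=rewrite | github.com/EnthusiasticTeslim/MIT6.00.1x | week6/codewars/shortest_steps_to_num.py | shortest_steps_to_num
-- ===== SOURCE A (Python) =====
-- def shortest_steps_to_num(num):
--     # Good Luck!
--     if num < 1 or num > 10000:
--         raise ValueError("Verify your input")
--
--     trans = 1
--     count = 0
--     while trans < num:
--         trans += trans
--         count += 1
--
--     return '{0} steps'.format(count)
-- ===== SOURCE B (Python) =====
-- def shortest_steps_to_num(num):
--     if num < 1 or num > 10000:
--         raise ValueError("Verify your input")
--     return '{0} steps'.format((num - 1).bit_length())
-- ===== Notes on version B (the rewrite author's own statement) =====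
-- stated objective: simpler
-- what changed: Replaces the doubling while-loop with the closed form (num-1).bit_length(), which equals the number of doublings needed to reach num.
import Mathlib
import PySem

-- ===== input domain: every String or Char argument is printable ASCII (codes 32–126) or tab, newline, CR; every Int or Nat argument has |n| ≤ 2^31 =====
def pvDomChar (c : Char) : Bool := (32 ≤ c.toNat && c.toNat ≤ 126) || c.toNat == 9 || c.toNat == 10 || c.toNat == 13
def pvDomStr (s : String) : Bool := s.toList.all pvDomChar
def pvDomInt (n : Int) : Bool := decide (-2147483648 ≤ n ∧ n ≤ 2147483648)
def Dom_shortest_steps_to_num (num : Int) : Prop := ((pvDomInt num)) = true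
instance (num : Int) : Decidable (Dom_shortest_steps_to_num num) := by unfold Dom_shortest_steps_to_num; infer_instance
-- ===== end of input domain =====

-- B replaces A's doubling while-loop by the closed form (num-1).bit_length(); objective: simpler.

-- ===== PORT A =====
-- A's while loop `while trans < num: trans += trans; count += 1`, made total with fuel;
-- on the admitted inputs num.toNat + 1 doublings from 1 always suffice, so the fuel never runs out.
def pvLoopA (num trans count : Int) (fuel : Nat) : Int :=
  match fuel with
  | 0 => count
  | fuel + 1 => if trans < num then pvLoopA num (trans + trans) (count + 1) fuel else count

def shortest_steps_to_num (num : Int) : String :=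
  PySem.Int.toStr (pvLoopA num 1 0 (num.toNat + 1)) ++ " steps"

-- ===== PORT B =====
-- Python's int.bit_length on a nonnegative argument
def pvBitLength (n : Nat) : Nat :=
  if n = 0 then 0 else pvBitLength (n / 2) + 1

def shortest_steps_to_num_alt (num : Int) : String :=
  PySem.Int.toStr ((pvBitLength (num - 1).toNat : Nat) : Int) ++ " steps"

-- ===== PRECONDITION & SPEC =====
-- Pre_ excludes exactly the inputs on which A raises ValueError ("Verify your input").
def Pre_shortest_steps_to_num (num : Int) : Prop := 1 ≤ num ∧ num ≤ 10000
instance (num : Int) : Decidable (Pre_shortest_steps_to_num num) := by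
  unfold Pre_shortest_steps_to_num; infer_instance
def pvWitness_shortest_steps_to_num : Int := 37

def Spec_shortest_steps_to_num (num : Int) (out : String) : Prop := out = shortest_steps_to_num_alt num
instance (num : Int) (out : String) : Decidable (Spec_shortest_steps_to_num num out) := by unfold Spec_shortest_steps_to_num; infer_instance

-- ===== CLAIM (what is proved, stated in full; the proofs are below) =====
def Claim_equal_shortest_steps_to_num : Prop := ∀ (num : Int), Dom_shortest_steps_to_num num → Pre_shortest_steps_to_num num → Spec_shortest_steps_to_num num (shortest_steps_to_num num)

-- ===== LEMMAS AND PROOFS =====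

theorem pvBitLength_lt (n : Nat) : n < 2 ^ pvBitLength n := by
  induction n using Nat.strong_induction_on with
  | _ n ih =>
    unfold pvBitLength
    split
    · omega
    · have h2 : n / 2 < n := by omega
      have := ih (n / 2) h2
      have : n / 2 < 2 ^ pvBitLength (n / 2) := this
      have hpow : 2 ^ (pvBitLength (n / 2) + 1) = 2 * 2 ^ pvBitLength (n / 2) := by ring
      omega

theorem pvBitLength_pos_le (n : Nat) (hn : n ≠ 0) : 2 ^ (pvBitLength n - 1) ≤ n := by
  induction n using Nat.strong_induction_on with
  | _ n ih =>
    unfold pvBitLength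
    split
    · omega
    · rename_i h0
      by_cases hq : n / 2 = 0
      · have : n = 1 := by omega
        subst this
        simp [pvBitLength]
      · have h2 : n / 2 < n := by omega
        have hle := ih (n / 2) h2 hq
        have hbl : 1 ≤ pvBitLength (n / 2) := by
          unfold pvBitLength; split
          · omega
          · omega
        have hpow : 2 ^ (pvBitLength (n / 2) + 1 - 1) = 2 * 2 ^ (pvBitLength (n / 2) - 1) := by
          rw [Nat.add_sub_cancel, ← pow_succ']
          congr 1
          omega
        omega

theorem pvBitLength_le_of_lt (n j : Nat) (h : n < 2 ^ j) : pvBitLength n ≤ j := by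
  by_cases hn : n = 0
  · subst hn; simp [pvBitLength]
  · by_contra hgt
    push Not at hgt
    have h1 := pvBitLength_pos_le n hn
    have h2 : 2 ^ j ≤ 2 ^ (pvBitLength n - 1) :=
      Nat.pow_le_pow_right (by omega) (by omega)
    omega

theorem pvBitLength_gt_of_le (n j : Nat) (h : 2 ^ j ≤ n) : j < pvBitLength n := by
  have h1 := pvBitLength_lt n
  have : 2 ^ j < 2 ^ pvBitLength n := by omega
  exact (Nat.pow_lt_pow_iff_right (by omega)).mp this

-- the loop invariant: starting from trans = 2^j, A's loop adds exactly
-- bit_length(num-1) - j to count, provided the fuel covers the remaining doublings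
theorem pvLoopA_eq (fuel : Nat) : ∀ (num : Int) (j : Nat) (count : Int), 1 ≤ num →
    pvBitLength (num - 1).toNat ≤ j + fuel →
    pvLoopA num ((2 : Int) ^ j) count fuel =
      count + ((pvBitLength (num - 1).toNat - j : Nat) : Int) := by
  induction fuel with
  | zero =>
    intro num j count h1 hf
    have h0 : pvBitLength (num - 1).toNat - j = 0 := by omega
    rw [pvLoopA, h0]
    simp
  | succ fuel ih =>
    intro num j count h1 hf
    set b := pvBitLength (num - 1).toNat with hb
    unfold pvLoopA
    split
    · rename_i hlt
      have hle : (2 : Int) ^ j ≤ num - 1 := by omega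
      have hnat : 2 ^ j ≤ (num - 1).toNat := by
        have : ((2 ^ j : Nat) : Int) = (2 : Int) ^ j := by push_cast; ring
        omega
      have hjb : j < b := pvBitLength_gt_of_le _ _ hnat
      have h2 : (2 : Int) ^ j + (2 : Int) ^ j = (2 : Int) ^ (j + 1) := by ring
      rw [h2, ih num (j + 1) (count + 1) h1 (by omega)]
      have hsub : b - j = (b - (j + 1)) + 1 := by omega
      rw [hsub]
      push_cast
      ring
    · rename_i hge
      have hlt' : (num - 1).toNat < 2 ^ j := by
        have : ((2 ^ j : Nat) : Int) = (2 : Int) ^ j := by push_cast; ring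
        omega
      have : b ≤ j := pvBitLength_le_of_lt _ _ hlt'
      have : b - j = 0 := by omega
      simp [this]

-- ===== VERDICT (by name: the statement is the Claim_ definition above) =====
theorem shortest_steps_to_num_spec : Claim_equal_shortest_steps_to_num := by
  intro num _ hpre
  unfold Spec_shortest_steps_to_num Pre_shortest_steps_to_num at *
  obtain ⟨h1, h2⟩ := hpre
  unfold shortest_steps_to_num shortest_steps_to_num_alt
  have hfuel : pvBitLength (num - 1).toNat ≤ 0 + (num.toNat + 1) := by
    have hlt := Nat.lt_two_pow_self (n := num.toNat + 1)
    have hle : (num - 1).toNat < 2 ^ (num.toNat + 1) := by omega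
    have := pvBitLength_le_of_lt _ _ hle
    omega
  have := pvLoopA_eq (num.toNat + 1) num 0 0 h1 hfuel
  simp only [pow_zero] at this
  rw [this]
  simp
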